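-- pv_equiv track=rewrite | github.com/jafingerhut/p4-guide | match-range-using-tcam/range-to-tcam-entries.py | calculate_all_prefix_masks_dict
-- ===== SOURCE A (Python) =====
-- def calculate_all_prefix_masks_dict(W):
--     all_prefix_masks_dict = {}
--     W_mask = (1 << W) - 1
--     mask = W_mask
--     while mask != 0:
--         all_prefix_masks_dict[mask] = True
--         mask = (mask << 1) & W_mask
--     all_prefix_masks_dict[0] = True
--     return all_prefix_masks_dict
-- ===== SOURCE B (Python) =====
-- def calculate_all_prefix_masks_dict(W):
--     # collect the prefix masks in ascending order by summing bit values
--     # from the highest bit downward, then build the dict back-to-front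
--     keys = [0]
--     acc = 0
--     bit = (1 << W) >> 1
--     while bit:
--         acc += bit
--         keys.append(acc)
--         bit >>= 1
--     return dict.fromkeys(reversed(keys), True)
-- ===== Notes on version B (the rewrite author's own statement) =====
-- stated objective: alternative
-- what changed: Replaces the while-loop that threads a running mask by left-shift-and-mask with insertion into the dict each step by a staged back-to-front construction: the masks are collected in ascending order by summing bit values from the highest bit downward into a list, which is then reversed and turned into the dict in one dict.fromkeys pass.
import Mathlib
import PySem

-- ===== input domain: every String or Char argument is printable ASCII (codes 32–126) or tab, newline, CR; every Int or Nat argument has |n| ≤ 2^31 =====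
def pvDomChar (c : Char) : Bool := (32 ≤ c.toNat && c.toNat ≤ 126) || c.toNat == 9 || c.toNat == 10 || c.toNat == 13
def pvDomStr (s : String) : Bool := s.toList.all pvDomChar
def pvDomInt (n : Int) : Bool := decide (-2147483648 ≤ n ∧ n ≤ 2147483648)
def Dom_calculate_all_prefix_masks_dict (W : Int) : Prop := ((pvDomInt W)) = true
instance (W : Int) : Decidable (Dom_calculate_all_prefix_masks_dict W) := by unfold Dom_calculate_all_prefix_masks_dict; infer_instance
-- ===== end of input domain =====

-- B collects the masks in ascending order by summing bit values from the highest bit downward, then reverses and builds the dict in one staged pass; equivalence proved for all W ≥ 0.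

-- ===== PORT A =====
-- the while loop: fuel only makes the recursion total; fuel W.toNat + 1 is enough (proved below)
def pvA_loop (fuel : Nat) (W_mask : Int) (mask : Int) (d : PySem.Dict Int Bool) : PySem.Dict Int Bool :=
  match fuel with
  | 0 => d
  | f + 1 =>
    if mask ≠ 0 then
      pvA_loop f W_mask (Int.land (mask <<< (1 : Nat)) W_mask) (d.insert mask true)
    else d

def calculate_all_prefix_masks_dict (W : Int) : List (Int × Bool) :=
  let W_mask : Int := (1 <<< W.toNat) - 1       -- 1 << W (W ≥ 0 by Pre_)
  let d := pvA_loop (W.toNat + 1) W_mask W_mask PySem.Dict.empty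
  (d.insert 0 true).items

-- ===== PORT B =====
-- Source B's while loop over bit (bit = 0 after exactly W iterations, so fuel W.toNat suffices; proved below)
def pvB_loop (fuel : Nat) (bit acc : Int) (keys : List Int) : List Int :=
  match fuel with
  | 0 => keys
  | f + 1 =>
    if bit ≠ 0 then
      pvB_loop f (bit >>> (1 : Nat)) (acc + bit) (keys ++ [acc + bit])
    else keys

def calculate_all_prefix_masks_dict_alt (W : Int) : List (Int × Bool) :=
  -- keys = [0]; acc = 0; bit = (1 << W) >> 1; while bit: acc += bit; keys.append(acc); bit >>= 1
  let keys := pvB_loop W.toNat (((1 : Int) <<< W.toNat) >>> (1 : Nat)) 0 [0]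
  -- dict.fromkeys(reversed(keys), True)
  (keys.reverse.foldl (fun d k => d.insert k true) PySem.Dict.empty).items

-- ===== PRECONDITION & SPEC =====
-- Python A raises ValueError ('negative shift count') on W < 0; B never returns there either (infinite recursion).
def Pre_calculate_all_prefix_masks_dict (W : Int) : Prop := 0 ≤ W
instance (W : Int) : Decidable (Pre_calculate_all_prefix_masks_dict W) := by unfold Pre_calculate_all_prefix_masks_dict; infer_instance
def pvWitness_calculate_all_prefix_masks_dict : Int := (3)

def Spec_calculate_all_prefix_masks_dict (W : Int) (out : List (Int × Bool)) : Prop := out = calculate_all_prefix_masks_dict_alt W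
instance (W : Int) (out : List (Int × Bool)) : Decidable (Spec_calculate_all_prefix_masks_dict W out) := by unfold Spec_calculate_all_prefix_masks_dict; infer_instance

-- ===== CLAIM (what is proved, stated in full; the proofs are below) =====
def Claim_equal_calculate_all_prefix_masks_dict : Prop := ∀ (W : Int), Dom_calculate_all_prefix_masks_dict W → Pre_calculate_all_prefix_masks_dict W → Spec_calculate_all_prefix_masks_dict W (calculate_all_prefix_masks_dict W)

-- ===== LEMMAS AND PROOFS =====

-- mask value at step s: 2^n - 2^s
def pvMask (n s : Nat) : Int := (2 : Int) ^ n - 2 ^ s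

lemma pvNat_step {n s : Nat} (h : s < n) :
    ((2^n - 2^s) <<< 1) &&& (2^n - 1 : Nat) = 2^n - 2^(s+1) := by
  rw [Nat.and_two_pow_sub_one_eq_mod, Nat.shiftLeft_eq]
  have h1 : 2^(s+1) ≤ 2^n := Nat.pow_le_pow_right (by norm_num) h
  have h2 : 2^s*2 = 2^(s+1) := (pow_succ 2 s).symm
  have h3 : (2^n - 2^s) * 2^1 = 2^n + (2^n - 2^(s+1)) := by
    have := Nat.one_le_two_pow (n := s); omega
  rw [h3, Nat.add_mod_left, Nat.mod_eq_of_lt (by have := Nat.one_le_two_pow (n := s+1); omega)]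

lemma pvMask_cast {n s : Nat} (h : s ≤ n) : pvMask n s = ((2^n - 2^s : Nat) : Int) := by
  have h1 : 2^s ≤ 2^n := Nat.pow_le_pow_right (by norm_num) h
  unfold pvMask
  push_cast [Nat.cast_sub h1]
  ring

lemma pvCast_W_mask (n : Nat) : (2 : Int) ^ n - 1 = ((2^n - 1 : Nat) : Int) := by
  have h1 := Nat.one_le_two_pow (n := n)
  push_cast [Nat.cast_sub h1]
  ring

lemma pvMask_pos {n s : Nat} (h : s < n) : 0 < pvMask n s := by
  unfold pvMask
  have : (2:Int)^s < 2^n := by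
    exact_mod_cast Nat.pow_lt_pow_right (by norm_num) h
  omega

lemma pvMask_step {n s : Nat} (h : s < n) :
    Int.land ((pvMask n s) <<< (1 : Nat)) ((2 : Int) ^ n - 1) = pvMask n (s + 1) := by
  rw [pvMask_cast (le_of_lt h), pvCast_W_mask]
  have e1 : (((2^n - 2^s : Nat) : Int) <<< (1 : Nat)) = (((2^n - 2^s) <<< 1 : Nat) : Int) := rfl
  rw [e1]
  have e2 : Int.land ((((2^n - 2^s) <<< 1 : Nat)) : Int) ((2^n - 1 : Nat) : Int)
      = ((((2^n - 2^s) <<< 1) &&& (2^n - 1) : Nat) : Int) := rfl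
  rw [e2, pvNat_step h, pvMask_cast (by omega : s + 1 ≤ n)]

lemma pvMask_inj {n a b : Nat} (e : pvMask n a = pvMask n b) : a = b := by
  unfold pvMask at e
  have e2 : (2:Int)^a = (2:Int)^b := by omega
  have e3 : ((2^a : Nat) : Int) = ((2^b : Nat) : Int) := by push_cast; exact e2
  exact Nat.pow_right_injective (le_refl 2) (Nat.cast_inj.mp e3)

lemma pvA_loop_spec (n : Nat) : ∀ (k s : Nat) (d : PySem.Dict Int Bool), s + k = n →
    (∀ p ∈ d.items, pvMask n s < p.1) →
    (pvA_loop (k + 1) ((2 : Int) ^ n - 1) (pvMask n s) d).items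
      = d.items ++ (List.range k).map (fun i => (pvMask n (s + i), true)) := by
  intro k
  induction k with
  | zero =>
    intro s d hs _
    have hz : pvMask n s = 0 := by subst hs; simp [pvMask]
    simp [pvA_loop, hz]
  | succ j ih =>
    intro s d hs hd
    have hlt : s < n := by omega
    have hpos := pvMask_pos hlt
    have hnc : d.contains (pvMask n s) = false := by
      rw [PySem.Dict.contains_eq_decide_mem_keys, decide_eq_false_iff_not]
      intro hmem
      simp only [PySem.Dict.keys, List.mem_map] at hmem
      obtain ⟨p, hp, hpe⟩ := hmem
      exact absurd (hd p hp) (by omega)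
    have step : pvA_loop (j + 1 + 1) ((2 : Int) ^ n - 1) (pvMask n s) d
        = pvA_loop (j + 1) ((2 : Int) ^ n - 1) (pvMask n (s + 1)) (d.insert (pvMask n s) true) := by
      rw [pvA_loop, if_pos (by omega), pvMask_step hlt]
    rw [step, ih (s + 1) _ (by omega) ?_, PySem.Dict.items_insert_of_not_contains _ _ hnc]
    · have hfun : ∀ i, s + 1 + i = s + (i + 1) := by omega
      rw [List.range_succ_eq_map, List.map_cons, List.map_map]
      simp [Function.comp_def, hfun]
    · intro p hp
      rw [PySem.Dict.mem_items_insert] at hp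
      have hm : pvMask n (s + 1) < pvMask n s := by
        unfold pvMask
        have : (2:Int)^s < 2^(s+1) := by
          exact_mod_cast Nat.pow_lt_pow_right (by norm_num) (Nat.lt_succ_self s)
        omega
      rcases hp with h1 | ⟨h2, _⟩
      · rw [h1]; exact hm
      · exact lt_trans hm (hd p h2)

lemma pvShiftR (k : Nat) : ((2 : Int) ^ (k + 1)) >>> (1 : Nat) = 2 ^ k := by
  have e0 : ((2 : Int) ^ (k + 1)) = ((2 ^ (k + 1) : Nat) : Int) := by push_cast; ring
  have e1 : (((2 ^ (k + 1) : Nat) : Int)) >>> (1 : Nat) = ((2 ^ (k + 1) >>> 1 : Nat) : Int) := rfl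
  have e2 : (2 ^ (k + 1) >>> 1 : Nat) = 2 ^ k := by
    rw [Nat.shiftRight_eq_div_pow, pow_succ, pow_one]; omega
  rw [e0, e1, e2]; push_cast; ring

lemma pvB_loop_spec (n : Nat) : ∀ (k : Nat) (keys : List Int),
    pvB_loop k ((2 : Int) ^ k >>> (1 : Nat)) (pvMask n k) keys
      = keys ++ (List.range k).map (fun i => pvMask n (k - 1 - i)) := by
  intro k
  induction k with
  | zero => intro keys; simp [pvB_loop]
  | succ j ih =>
    intro keys
    have hbit : ((2 : Int) ^ (j + 1)) >>> (1 : Nat) = 2 ^ j := pvShiftR j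
    have hne : ((2 : Int) ^ j) ≠ 0 := by positivity
    have hacc : pvMask n (j + 1) + (2 : Int) ^ j = pvMask n j := by
      unfold pvMask; rw [pow_succ]; ring
    rw [pvB_loop, hbit, if_pos hne, hacc, ih]
    rw [List.range_succ_eq_map, List.map_cons, List.map_map]
    simp only [Nat.add_sub_cancel, Nat.sub_zero, List.append_assoc, List.singleton_append]
    congr 2
    refine List.map_congr_left ?_
    intro i _
    simp only [Function.comp_def]
    congr 1
    omega

lemma pvB_keys_rev (n : Nat) :
    (([(0 : Int)] ++ (List.range n).map (fun i => pvMask n (n - 1 - i))).reverse)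
      = (List.range (n + 1)).map (fun s => pvMask n s) := by
  apply List.ext_getElem
  · simp
  · intro j hj1 hj2
    simp only [List.length_map, List.length_range] at hj2
    rw [List.getElem_reverse]
    simp only [List.length_append, List.length_map, List.length_range, List.length_cons,
      List.length_nil, List.getElem_map, List.getElem_range]
    by_cases hj : j < n
    · rw [List.getElem_append_right (by simp; omega)]
      simp only [List.getElem_map, List.getElem_range, List.length_cons, List.length_nil]
      congr 1
      omega
    · have hjn : j = n := by omega
      rw [List.getElem_append_left (by simp; omega)]
      subst hjn
      simp [pvMask]

theorem pv_main (W : Int) (hW : 0 ≤ W) :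
    calculate_all_prefix_masks_dict W = calculate_all_prefix_masks_dict_alt W := by
  set n := W.toNat with hn
  have hM : ((1 <<< n : Nat) : Int) - 1 = (2 : Int) ^ n - 1 := by
    rw [Nat.one_shiftLeft]; push_cast; ring
  -- A side
  have hA : calculate_all_prefix_masks_dict W
      = (List.range n).map (fun i => (pvMask n i, true)) ++ [((0 : Int), true)] := by
    simp only [calculate_all_prefix_masks_dict]
    rw [← hn]
    simp only [hM]
    have h0 : pvMask n 0 = (2 : Int) ^ n - 1 := by simp [pvMask]
    have hloop := pvA_loop_spec n n 0 PySem.Dict.empty (by omega) (by intro p hp; simp [PySem.Dict.empty] at hp)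
    rw [h0] at hloop
    set d := pvA_loop (n + 1) ((2 : Int) ^ n - 1) ((2 : Int) ^ n - 1) PySem.Dict.empty with hd
    have hitems : d.items = (List.range n).map (fun i => (pvMask n (0 + i), true)) := by
      rw [hd, hloop]; simp [PySem.Dict.empty]
    have hnc : d.contains 0 = false := by
      rw [PySem.Dict.contains_eq_decide_mem_keys, decide_eq_false_iff_not]
      intro hmem
      simp only [PySem.Dict.keys, hitems, List.map_map, List.mem_map, Function.comp] at hmem
      obtain ⟨i, hi, hie⟩ := hmem
      rw [List.mem_range] at hi
      exact absurd (pvMask_pos hi) (by simp at hie; omega)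
    rw [PySem.Dict.items_insert_of_not_contains _ _ hnc, hitems]
    simp
  -- B side
  have hB : calculate_all_prefix_masks_dict_alt W
      = (List.range (n + 1)).map (fun s => (pvMask n s, true)) := by
    simp only [calculate_all_prefix_masks_dict_alt]
    rw [← hn]
    have hbit0 : (((1 : Int) <<< n) >>> (1 : Nat)) = (2 : Int) ^ n >>> (1 : Nat) := by
      have e0 : ((1 : Int) <<< n) = ((1 <<< n : Nat) : Int) := rfl
      have e1 : ((2 ^ n : Nat) : Int) = (2 : Int) ^ n := by push_cast; ring
      rw [e0, Nat.one_shiftLeft, e1]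
    have hm0 : (0 : Int) = pvMask n n := by simp [pvMask]
    have hkeys : pvB_loop n (((1 : Int) <<< n) >>> (1 : Nat)) 0 [0]
        = [(0 : Int)] ++ (List.range n).map (fun i => pvMask n (n - 1 - i)) := by
      rw [hbit0]
      have h2 := pvB_loop_spec n n [0]
      rw [← hm0] at h2
      exact h2
    rw [hkeys, pvB_keys_rev]
    have hc : ∀ a ∈ (List.range (n + 1)).map (fun s => pvMask n s),
        (PySem.Dict.empty : PySem.Dict Int Bool).contains a = false := by
      intro a _; simp [PySem.Dict.empty, PySem.Dict.contains]
    have hnd : (((List.range (n + 1)).map (fun s => pvMask n s)).map id).Nodup := by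
      rw [List.map_id]
      exact List.nodup_range.map_on (fun a _ b _ e => pvMask_inj e)
    have := PySem.Dict.items_foldl_insert_fresh ((List.range (n + 1)).map (fun s => pvMask n s))
      (fun a => a) (fun _ => true) (PySem.Dict.empty : PySem.Dict Int Bool) hc hnd
    simp only [PySem.Dict.empty] at this ⊢
    rw [this]
    simp [List.map_map, Function.comp_def]
  rw [hA, hB, List.range_succ, List.map_append]
  simp [pvMask]

-- ===== VERDICT (by name: the statement is the Claim_ definition above) =====
theorem calculate_all_prefix_masks_dict_spec : Claim_equal_calculate_all_prefix_masks_dict := by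
  intro W _ hPre
  exact pv_main W hPre
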